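-- pv_equiv track=rewrite | github.com/JahodaPaul/FIT_CTU | Show3D.py | createCuboid
-- ===== SOURCE A (Python) =====
-- def createCuboid(x, y, z):
--     returnX = []
--     returnY = []
--     returnZ = []
--
--     firstCoord = [0, 1, 1, 0, 0]
--     secondCoord = [0, 0, 1, 1, 0]
--     for i in range(2):
--         for j in range(5):
--             returnX.append(x[firstCoord[j]])
--             returnY.append(y[secondCoord[j]])
--             returnZ.append(z[i])
--
--     cnt = 1
--     k = 1
--     tmpZ = 1
--     for j in range(3):
--         for i in range(2):
--             if k % 2 == 0:
--                 if tmpZ == 0: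
--                     tmpZ = 1
--                 else:
--                     tmpZ = 0
--             k += 1
--             returnX.append(x[firstCoord[cnt]])
--             returnY.append(y[secondCoord[cnt]])
--             returnZ.append(z[tmpZ])
--         cnt += 1
--     return returnX, returnY, returnZ
-- ===== SOURCE B (Python) =====
-- # Table-driven: the 16 vertex indices are constants; one zip pass replaces the two loops and the k/tmpZ toggle.
-- _XI = [0, 1, 1, 0, 0, 0, 1, 1, 0, 0, 1, 1, 1, 1, 0, 0]
-- _YI = [0, 0, 1, 1, 0, 0, 0, 1, 1, 0, 0, 0, 1, 1, 1, 1]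
-- _ZI = [0, 0, 0, 0, 0, 1, 1, 1, 1, 1, 1, 0, 0, 1, 1, 0]
--
-- def createCuboid(x, y, z):
--     return [x[i] for i in _XI], [y[i] for i in _YI], [z[i] for i in _ZI]
-- ===== Notes on version B (the rewrite author's own statement) =====
-- stated objective: simpler
-- what changed: Replaced the two loop nests and the cnt/k/tmpZ toggle state machine by three precomputed constant index tables and a single lookup pass per output list.
import Mathlib
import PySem

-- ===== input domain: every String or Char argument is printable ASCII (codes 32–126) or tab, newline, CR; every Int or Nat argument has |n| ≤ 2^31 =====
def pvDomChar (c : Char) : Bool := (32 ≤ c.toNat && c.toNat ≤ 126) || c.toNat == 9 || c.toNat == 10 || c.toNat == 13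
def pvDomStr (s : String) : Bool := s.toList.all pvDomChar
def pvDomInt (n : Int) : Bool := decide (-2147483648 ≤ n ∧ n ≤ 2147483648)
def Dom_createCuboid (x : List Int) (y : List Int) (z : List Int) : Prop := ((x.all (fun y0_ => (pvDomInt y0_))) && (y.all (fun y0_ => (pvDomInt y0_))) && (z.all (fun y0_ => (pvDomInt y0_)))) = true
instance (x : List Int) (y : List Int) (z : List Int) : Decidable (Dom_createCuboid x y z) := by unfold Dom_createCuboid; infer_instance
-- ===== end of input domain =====

-- B replaces A's two loop nests and the k/tmpZ toggle state machine by three constant index tables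
-- and one pass of lookups (objective: simpler).

-- ===== PORT A ===== (literal transliteration; pyGet? none = IndexError, excluded by Pre_, so .getD 0 is never taken inside Pre_)
def createCuboid (x : List Int) (y : List Int) (z : List Int) : List Int × List Int × List Int :=
  let firstCoord : List Int := [0, 1, 1, 0, 0]
  let secondCoord : List Int := [0, 0, 1, 1, 0]
  -- first loop nest: for i in range(2): for j in range(5): append
  let s1 : List Int × List Int × List Int :=
    (PySem.List.pyRange 0 2 1).foldl (fun st i =>
      (PySem.List.pyRange 0 5 1).foldl (fun st j =>
        (st.1 ++ [(PySem.List.pyGet? x ((PySem.List.pyGet? firstCoord j).getD 0)).getD 0],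
         st.2.1 ++ [(PySem.List.pyGet? y ((PySem.List.pyGet? secondCoord j).getD 0)).getD 0],
         st.2.2 ++ [(PySem.List.pyGet? z i).getD 0])) st) ([], [], [])
  -- second loop nest, state (cnt, k, tmpZ, returnX, returnY, returnZ)
  let s2 : Int × Int × Int × List Int × List Int × List Int :=
    (PySem.List.pyRange 0 3 1).foldl (fun st _j =>
      let st' := (PySem.List.pyRange 0 2 1).foldl (fun st _i =>
        let cnt := st.1
        let k := st.2.1
        let tmpZ := st.2.2.1
        let tmpZ' := if PySem.Int.mod k 2 = 0 then (if tmpZ = 0 then 1 else 0) else tmpZ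
        (cnt, k + 1, tmpZ',
         st.2.2.2.1 ++ [(PySem.List.pyGet? x ((PySem.List.pyGet? firstCoord cnt).getD 0)).getD 0],
         st.2.2.2.2.1 ++ [(PySem.List.pyGet? y ((PySem.List.pyGet? secondCoord cnt).getD 0)).getD 0],
         st.2.2.2.2.2 ++ [(PySem.List.pyGet? z tmpZ').getD 0])) st
      (st'.1 + 1, st'.2)) (1, 1, 1, s1)
  s2.2.2.2

-- ===== PORT B ===== (Source B: constant index tables, one lookup pass each)
def pvXI : List Int := [0, 1, 1, 0, 0, 0, 1, 1, 0, 0, 1, 1, 1, 1, 0, 0]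
def pvYI : List Int := [0, 0, 1, 1, 0, 0, 0, 1, 1, 0, 0, 0, 1, 1, 1, 1]
def pvZI : List Int := [0, 0, 0, 0, 0, 1, 1, 1, 1, 1, 1, 0, 0, 1, 1, 0]

def createCuboid_alt (x : List Int) (y : List Int) (z : List Int) : List Int × List Int × List Int :=
  (pvXI.map (fun i => (PySem.List.pyGet? x i).getD 0),
   pvYI.map (fun i => (PySem.List.pyGet? y i).getD 0),
   pvZI.map (fun i => (PySem.List.pyGet? z i).getD 0))

-- ===== PRECONDITION & SPEC =====
-- A indexes x[1], y[1], z[1]: it raises IndexError (and B likewise) when any list has fewer than 2 elements.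
def Pre_createCuboid (x : List Int) (y : List Int) (z : List Int) : Prop :=
  2 ≤ x.length ∧ 2 ≤ y.length ∧ 2 ≤ z.length
instance (x : List Int) (y : List Int) (z : List Int) : Decidable (Pre_createCuboid x y z) := by unfold Pre_createCuboid; infer_instance
def pvWitness_createCuboid : List Int × List Int × List Int := ([1, 2], [3, 4], [5, 6])

def Spec_createCuboid (x : List Int) (y : List Int) (z : List Int) (out : List Int × List Int × List Int) : Prop := out = createCuboid_alt x y z
instance (x : List Int) (y : List Int) (z : List Int) (out : List Int × List Int × List Int) : Decidable (Spec_createCuboid x y z out) := by unfold Spec_createCuboid; infer_instance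

-- ===== CLAIM (what is proved, stated in full; the proofs are below) =====
def Claim_equal_createCuboid : Prop := ∀ (x : List Int) (y : List Int) (z : List Int), Dom_createCuboid x y z → Pre_createCuboid x y z → Spec_createCuboid x y z (createCuboid x y z)

-- ===== LEMMAS AND PROOFS =====
theorem pvExistsTwo {α : Type} (l : List α) (h : 2 ≤ l.length) : ∃ a b t, l = a :: b :: t := by
  match l with
  | a :: b :: t => exact ⟨a, b, t, rfl⟩
  | [] => simp at h
  | [a] => simp at h

-- ===== VERDICT (by name: the statement is the Claim_ definition above) =====
theorem createCuboid_spec : Claim_equal_createCuboid := by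
  intro x y z _ hpre
  obtain ⟨x0, x1, xt, rfl⟩ := pvExistsTwo x hpre.1
  obtain ⟨y0, y1, yt, rfl⟩ := pvExistsTwo y hpre.2.1
  obtain ⟨z0, z1, zt, rfl⟩ := pvExistsTwo z hpre.2.2
  rfl
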